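-- pv_equiv track=rewrite | github.com/IBRSI/-226 | lab_№3.py | rarestword
-- ===== SOURCE A (Python) =====
-- from collections import Counter
--
-- def rarestword(string):
--     if not string or string.isdigit():
--         return 'Слов нет'
--
--     nstring = ''
--     for i in string:
--         if i.isalpha() or i.isspace():
--             nstring = nstring + i.lower()
--
--
--     split_string = nstring.split()
--
--
--     word_freqs = Counter(split_string)
--
--     if not word_freqs:
--         return 'Слов нет'
--
--
--     words = [i for i in word_freqs if word_freqs.get(i) == min(word_freqs.values())]
--
--
--     return sorted(words)[0]
-- ===== SOURCE B (Python) =====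
-- def rarestword(string):
--     if not string or string.isdigit():
--         return 'Слов нет'
--
--     nstring = ''.join(c.lower() for c in string if c.isalpha() or c.isspace())
--     tokens = nstring.split()
--     if not tokens:
--         return 'Слов нет'
--
--     tokens.sort()
--     # run-length encode the sorted tokens (built back-to-front, no dict needed)
--     runs = []
--     for w in reversed(tokens):
--         if runs and runs[0][0] == w:
--             runs[0] = (w, runs[0][1] + 1)
--         else:
--             runs.insert(0, (w, 1))
--
--     best = runs[0]
--     for r in runs[1:]:
--         if r[1] < best[1]:
--             best = r
--     return best[0]
-- ===== Notes on version B (the rewrite author's own statement) =====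
-- stated objective: alternative
-- what changed: A hash-counts the words with Counter and then does min-of-values, filter the keys, sort the survivors and take [0]; B builds no dictionary at all: it sorts the token list, run-length-encodes the adjacent duplicates, and one scan over the runs keeps the first (hence alphabetically smallest) run of strictly minimal length.
import Mathlib
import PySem

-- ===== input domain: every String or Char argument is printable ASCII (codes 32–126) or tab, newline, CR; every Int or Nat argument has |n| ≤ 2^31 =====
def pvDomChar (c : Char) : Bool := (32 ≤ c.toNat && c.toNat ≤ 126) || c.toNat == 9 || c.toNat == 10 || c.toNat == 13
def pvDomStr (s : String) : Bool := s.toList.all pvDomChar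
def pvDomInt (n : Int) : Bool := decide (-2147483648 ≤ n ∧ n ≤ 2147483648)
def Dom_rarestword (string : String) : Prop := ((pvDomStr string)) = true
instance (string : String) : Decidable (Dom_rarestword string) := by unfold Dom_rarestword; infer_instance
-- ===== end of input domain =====

-- B replaces A's Counter dictionary and its "min of values, filter the keys, sort the survivors, take [0]"
-- by a dict-free algorithm: sort the token list, run-length-encode adjacent duplicates, keep the first run
-- of strictly minimal length (alternative algorithm, similar cost).

-- ===== PORT A =====
def rarestword (string : String) : String :=
  if string.toList.isEmpty || PySem.Chars.strIsdigit string.toList then "Слов нет"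
  else
    let nstring : List Char := string.toList.foldl
      (fun acc i => if PySem.Chars.isalpha i || PySem.Chars.isspace i then acc ++ [PySem.Chars.lowerChar i] else acc) []
    let split_string : List (List Char) := PySem.Chars.split₀ nstring
    let word_freqs : PySem.Dict (List Char) Int := PySem.Dict.counter split_string
    if word_freqs.size = 0 then "Слов нет"
    else
      let words := word_freqs.keys.filter
        (fun i => word_freqs.get? i == PySem.List.min? word_freqs.values (fun v => v))
      match PySem.List.sorted words (fun w => w) false with
      | [] => "Слов нет"        -- unreachable: words is provably nonempty (sorted(words)[0] never raises)
      | w :: _ => String.ofList w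

-- ===== PORT B =====
-- one step of B's run-length-encoding loop ('if runs and runs[0][0] == w: bump runs[0] else: insert (w,1) at 0')
def pvRleStep (w : List Char) (runs : List (List Char × Int)) : List (List Char × Int) :=
  match runs with
  | (v, c) :: rest => if v == w then (w, c + 1) :: rest else (w, 1) :: (v, c) :: rest
  | [] => [(w, 1)]

def rarestword_alt (string : String) : String :=
  if string.toList.isEmpty || PySem.Chars.strIsdigit string.toList then "Слов нет"
  else
    let nstring : List Char :=
      (string.toList.filter (fun c => PySem.Chars.isalpha c || PySem.Chars.isspace c)).map PySem.Chars.lowerChar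
    let tokens : List (List Char) := PySem.Chars.split₀ nstring
    if tokens.isEmpty then "Слов нет"
    else
      let ts := PySem.List.sorted tokens (fun w => w) false
      -- 'for w in reversed(ts): …' building runs at the front = foldr of the loop body
      let runs : List (List Char × Int) := ts.foldr pvRleStep []
      match runs with
      | [] => "Слов нет"        -- unreachable: ts is nonempty, so runs is nonempty (runs[0] never raises)
      | r :: rest => String.ofList (rest.foldl (fun best x => if x.2 < best.2 then x else best) r).1

-- ===== PRECONDITION & SPEC =====
def Spec_rarestword (string : String) (out : String) : Prop := out = rarestword_alt string
instance (string : String) (out : String) : Decidable (Spec_rarestword string out) := by unfold Spec_rarestword; infer_instance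

-- ===== CLAIM (what is proved, stated in full; the proofs are below) =====
def Claim_equal_rarestword : Prop := ∀ (string : String), Dom_rarestword string → Spec_rarestword string (rarestword string)

-- ===== LEMMAS AND PROOFS =====

-- The strict-"<" running-minimum scan returns the FIRST element achieving the minimum:
-- the head of the sublist of global minimisers.
lemma scanFirstMin {α : Type} (f : α → Int) :
    ∀ (rest : List α) (w : α),
      ((w :: rest).filter (fun x => decide (∀ y ∈ w :: rest, f x ≤ f y))).head?
        = some (rest.foldl (fun b x => if f x < f b then x else b) w) := by
  intro rest
  induction rest with
  | nil => intro w; simp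
  | cons x rs ih =>
    intro w
    by_cases hx : f x < f w
    · have hpred : ∀ z, (decide (∀ y ∈ w :: x :: rs, f z ≤ f y))
          = (decide (∀ y ∈ x :: rs, f z ≤ f y)) := by
        intro z
        rw [decide_eq_decide]
        constructor
        · intro h y hy; exact h y (List.mem_cons_of_mem _ hy)
        · intro h y hy
          rcases List.mem_cons.mp hy with rfl | hy'
          · exact le_trans (h x (List.mem_cons_self)) (le_of_lt hx)
          · exact h y hy'
      have hnw : ¬ (∀ y ∈ x :: rs, f w ≤ f y) := by
        intro h; exact absurd (h x (List.mem_cons_self)) (not_le.mpr hx)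
      simp only [List.foldl_cons, if_pos hx]
      rw [show ((w :: x :: rs).filter (fun z => decide (∀ y ∈ w :: x :: rs, f z ≤ f y)))
            = ((w :: x :: rs).filter (fun z => decide (∀ y ∈ x :: rs, f z ≤ f y))) from
          List.filter_congr (fun z _ => hpred z)]
      rw [List.filter_cons_of_neg (a := w) (l := x :: rs) (by simpa using hnw)]
      exact ih x
    · have hwx : f w ≤ f x := not_lt.mp hx
      have hpred : ∀ z, (decide (∀ y ∈ w :: x :: rs, f z ≤ f y))
          = (decide (∀ y ∈ w :: rs, f z ≤ f y)) := by
        intro z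
        rw [decide_eq_decide]
        constructor
        · intro h y hy
          rcases List.mem_cons.mp hy with rfl | hy'
          · exact h y List.mem_cons_self
          · exact h y (List.mem_cons_of_mem _ (List.mem_cons_of_mem _ hy'))
        · intro h y hy
          rcases List.mem_cons.mp hy with rfl | hy'
          · exact h y List.mem_cons_self
          rcases List.mem_cons.mp hy' with rfl | hy''
          · exact le_trans (h w List.mem_cons_self) hwx
          · exact h y (List.mem_cons_of_mem _ hy'')
      simp only [List.foldl_cons, if_neg hx]
      rw [show ((w :: x :: rs).filter (fun z => decide (∀ y ∈ w :: x :: rs, f z ≤ f y)))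
            = ((w :: x :: rs).filter (fun z => decide (∀ y ∈ w :: rs, f z ≤ f y))) from
          List.filter_congr (fun z _ => hpred z)]
      rw [← ih w]
      by_cases hpw : (∀ y ∈ w :: rs, f w ≤ f y)
      · rw [List.filter_cons_of_pos (a := w) (l := x :: rs) (by simpa using hpw),
            List.filter_cons_of_pos (a := w) (l := rs) (by simpa using hpw)]
        simp
      · have hpx : ¬ (∀ y ∈ w :: rs, f x ≤ f y) := by
          intro h
          apply hpw
          intro y hy
          exact le_trans hwx (h y hy)
        rw [List.filter_cons_of_neg (a := w) (l := x :: rs) (by simpa using hpw),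
            List.filter_cons_of_neg (a := w) (l := rs) (by simpa using hpw),
            List.filter_cons_of_neg (a := x) (l := rs) (by simpa using hpx)]

-- sorted is insensitive to which Decidable instance backs the comparison
lemma sorted_inst (i : DecidableLT (List Char)) (xs : List (List Char)) (key : List Char → List Char) (rev : Bool) :
    @PySem.List.sorted (List Char) (List Char) List.instLT i xs key rev
      = @PySem.List.sorted (List Char) (List Char) List.instLT
          (@LinearOrder.toDecidableLT _ List.instLinearOrder) xs key rev := by
  congr 1

-- sorting a Nodup list of words gives a strictly increasing list
lemma sorted_nodup_lt (xs : List (List Char)) (hnd : xs.Nodup) :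
    (@PySem.List.sorted (List Char) (List Char) List.instLT
        (@LinearOrder.toDecidableLT _ List.instLinearOrder) xs (fun w => w) false).Pairwise (· < ·) := by
  have hpw := PySem.List.sorted_pairwise xs (fun w : List Char => w)
  have hnd' : List.Pairwise (fun a b : List Char => a ≠ b)
      (@PySem.List.sorted (List Char) (List Char) List.instLT
        (@LinearOrder.toDecidableLT _ List.instLinearOrder) xs (fun w => w) false) :=
    ((@PySem.List.sorted_perm (List Char) (List Char) List.instLT
        (@LinearOrder.toDecidableLT _ List.instLinearOrder) xs (fun w => w) false).nodup_iff).mpr hnd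
  refine (List.Pairwise.and hpw hnd').imp ?_
  rintro a b ⟨hle, hne'⟩
  exact lt_of_le_of_ne hle hne'

-- A's "filter by min of values, sort, take head" equals the strict-< first-minimum scan
-- over the alphabetically sorted keys, for any dict with distinct keys.
lemma pick_eq (d : PySem.Dict (List Char) Int) (hnd : d.keys.Nodup) (hne : d.keys ≠ []) :
    (match PySem.List.sorted
        (d.keys.filter (fun i => d.get? i == PySem.List.min? d.values (fun v => v)))
        (fun w => w) false with
      | [] => "Слов нет"
      | w :: _ => String.ofList w)
    = (match PySem.List.sorted d.keys (fun w => w) false with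
      | [] => "Слов нет"
      | w :: rest => String.ofList (rest.foldl (fun best x => if d.getD x 0 < d.getD best 0 then x else best) w)) := by
  set f : List Char → Int := fun w => d.getD w 0 with hf
  have hvals : d.values = d.keys.map f := PySem.Dict.values_eq_map_keys d hnd 0
  obtain ⟨m, hm⟩ : ∃ m, PySem.List.min? d.values (fun v => v) = some m := by
    rcases hmin : PySem.List.min? d.values (fun v => v) with _ | m
    · exfalso
      have := (PySem.List.min?_eq_none_iff d.values (fun v => v)).mp hmin
      rw [hvals] at this
      exact hne (List.map_eq_nil_iff.mp this)
    · exact ⟨m, rfl⟩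
  have hmmem : m ∈ d.values := PySem.List.min?_mem hm
  have hmmin : ∀ y ∈ d.values, m ≤ y := fun y hy => PySem.List.min?_isMin hm y hy
  obtain ⟨w0, hw0k, hw0⟩ : ∃ w0 ∈ d.keys, f w0 = m := by
    rw [hvals] at hmmem; exact List.mem_map.mp hmmem
  have hget : ∀ w ∈ d.keys, d.get? w = some (f w) := by
    intro w hw
    have hc : d.contains w = true := (PySem.Dict.contains_iff_mem_keys d w).mpr hw
    rw [PySem.Dict.contains_eq_isSome_get? d w] at hc
    rcases hg : d.get? w with _ | v
    · rw [hg] at hc; simp at hc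
    · have : d.getD w 0 = v := PySem.Dict.getD_of_get?_eq_some d 0 hg
      rw [hf]; simp only [this]
  have hfilter : d.keys.filter (fun i => d.get? i == PySem.List.min? d.values (fun v => v))
      = d.keys.filter (fun i => decide (∀ y ∈ d.keys, f i ≤ f y)) := by
    apply List.filter_congr
    intro i hi
    rw [hget i hi, hm]
    show (some (f i) == some m) = _
    rw [show (some (f i) == some m) = decide (f i = m) by
      cases Decidable.em (f i = m) with
      | inl h => simp [h]
      | inr h => simp [h]]
    rw [decide_eq_decide]
    constructor
    · intro h y hy
      rw [h]
      exact hmmin (f y) (by rw [hvals]; exact List.mem_map_of_mem hy)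
    · intro h
      have h1 : f i ≤ m := by rw [← hw0]; exact h w0 hw0k
      have h2 : m ≤ f i := hmmin (f i) (by rw [hvals]; exact List.mem_map_of_mem hi)
      omega
  have hsf : PySem.List.sorted (d.keys.filter (fun i => decide (∀ y ∈ d.keys, f i ≤ f y))) (fun w => w) false
      = (PySem.List.sorted d.keys (fun w => w) false).filter (fun i => decide (∀ y ∈ d.keys, f i ≤ f y)) := by
    simp only [sorted_inst]
    have hlt := sorted_nodup_lt d.keys hnd
    exact PySem.List.sorted_eq_of_perm_of_pairwise_lt _ _ _
      ((@PySem.List.sorted_perm (List Char) (List Char) List.instLT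
          (@LinearOrder.toDecidableLT _ List.instLinearOrder) d.keys (fun w => w) false).filter _)
      (hlt.filter _)
  obtain ⟨w, rest, hws⟩ : ∃ w rest, PySem.List.sorted d.keys (fun w => w) false = w :: rest := by
    rcases hs : PySem.List.sorted d.keys (fun w => w) false with _ | ⟨w, rest⟩
    · exact absurd ((PySem.List.sorted_eq_nil_iff _ _ _).mp hs) hne
    · exact ⟨w, rest, rfl⟩
  have hpred : ∀ z, (decide (∀ y ∈ d.keys, f z ≤ f y)) = (decide (∀ y ∈ w :: rest, f z ≤ f y)) := by
    intro z
    rw [decide_eq_decide]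
    constructor
    · intro h y hy
      exact h y ((PySem.List.mem_sorted _ _ _ _).mp (hws ▸ hy))
    · intro h y hy
      exact h y (hws ▸ (PySem.List.mem_sorted _ _ _ _).mpr hy)
  have hhead : ((w :: rest).filter (fun z => decide (∀ y ∈ w :: rest, f z ≤ f y))).head?
      = some (rest.foldl (fun b x => if f x < f b then x else b) w) := scanFirstMin f rest w
  rw [hfilter, hsf, hws]
  rw [show ((w :: rest).filter (fun i => decide (∀ y ∈ d.keys, f i ≤ f y)))
        = ((w :: rest).filter (fun z => decide (∀ y ∈ w :: rest, f z ≤ f y))) from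
      List.filter_congr (fun z _ => hpred z)]
  rcases hflt : (w :: rest).filter (fun z => decide (∀ y ∈ w :: rest, f z ≤ f y)) with _ | ⟨r, t⟩
  · rw [hflt] at hhead; simp at hhead
  · rw [hflt] at hhead
    simp only [List.head?] at hhead
    have : r = rest.foldl (fun b x => if f x < f b then x else b) w := by
      injection hhead
    simp only [this, hf]

-- B's run-length encoding of a (≤)-sorted word list is exactly
-- "the strictly increasing list of its distinct words, each paired with its multiplicity".
lemma rle_sorted :
    ∀ (ts : List (List Char)), ts.Pairwise (· ≤ ·) →
      ∃ ws : List (List Char), ws.Pairwise (· < ·) ∧ (∀ w, w ∈ ws ↔ w ∈ ts) ∧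
        ts.foldr pvRleStep [] = ws.map (fun w => (w, (ts.count w : Int))) := by
  intro ts
  induction ts with
  | nil => intro _; exact ⟨[], by simp, by simp, by simp⟩
  | cons w ts ih =>
    intro hp
    have hw : ∀ y ∈ ts, w ≤ y := (List.pairwise_cons.mp hp).1
    obtain ⟨ws, hlt, hmem, heq⟩ := ih (List.pairwise_cons.mp hp).2
    cases hts : ts with
    | nil =>
      subst hts
      have hws : ws = [] := by
        cases hws : ws with
        | nil => rfl
        | cons a t => exact absurd ((hmem a).mp (hws ▸ List.mem_cons_self)) (List.not_mem_nil)
      refine ⟨[w], by simp, by simp, ?_⟩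
      simp [pvRleStep]
    | cons t ts' =>
      have htmem : t ∈ ts := hts ▸ List.mem_cons_self
      obtain ⟨v, wrest, hwsc⟩ : ∃ v wrest, ws = v :: wrest := by
        cases hws : ws with
        | nil => exact absurd ((hmem t).mpr htmem) (hws ▸ List.not_mem_nil)
        | cons a tl => exact ⟨a, tl, rfl⟩
      subst hwsc
      rw [← hts] at *
      have hvts : v ∈ ts := (hmem v).mp List.mem_cons_self
      have hfold : (w :: ts).foldr pvRleStep []
          = pvRleStep w ((v, (ts.count v : Int)) :: wrest.map (fun u => (u, (ts.count u : Int)))) := by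
        rw [List.foldr_cons, heq, List.map_cons]
      by_cases hvw : v = w
      · subst hvw
        refine ⟨v :: wrest, hlt, ?_, ?_⟩
        · intro x
          constructor
          · intro hx; exact List.mem_cons_of_mem _ ((hmem x).mp hx)
          · intro hx
            rcases List.mem_cons.mp hx with rfl | hx'
            · exact List.mem_cons_self
            · exact (hmem x).mpr hx'
        · rw [hfold]
          simp only [pvRleStep, BEq.rfl, if_pos]
          rw [List.map_cons]
          congr 1
          · rw [List.count_cons_self]; push_cast; ring_nf
          · apply List.map_congr_left
            intro u hu
            have huv : v < u := (List.pairwise_cons.mp hlt).1 u hu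
            have hune : u ≠ v := ne_of_gt huv
            simp [hune.symm]
      · have hwnotin : w ∉ ts := by
          intro hwts
          have hwws : w ∈ v :: wrest := (hmem w).mpr hwts
          rcases List.mem_cons.mp hwws with h | h
          · exact hvw h.symm
          · have h1 : v < w := (List.pairwise_cons.mp hlt).1 w h
            have h2 : w ≤ v := hw v hvts
            exact absurd h1 (not_lt.mpr h2)
        refine ⟨w :: v :: wrest, ?_, ?_, ?_⟩
        · refine List.pairwise_cons.mpr ⟨?_, hlt⟩
          intro u hu
          have huts : u ∈ ts := (hmem u).mp hu
          have hune : w ≠ u := by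
            intro h; exact hwnotin (h ▸ huts)
          exact lt_of_le_of_ne (hw u huts) hune
        · intro x
          constructor
          · intro hx
            rcases List.mem_cons.mp hx with rfl | hx'
            · exact List.mem_cons_self
            · exact List.mem_cons_of_mem _ ((hmem x).mp hx')
          · intro hx
            rcases List.mem_cons.mp hx with rfl | hx'
            · exact List.mem_cons_self
            · exact List.mem_cons_of_mem _ ((hmem x).mpr hx')
        · rw [hfold]
          have hbne : ((v == w) = false) := beq_false_of_ne hvw
          simp only [pvRleStep, hbne, if_neg, Bool.false_eq_true, not_false_eq_true]
          rw [List.map_cons, List.map_cons]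
          congr 1
          · have : ts.count w = 0 := List.count_eq_zero.mpr hwnotin
            rw [List.count_cons_self, this]
            norm_num
          congr 1
          · simp [Ne.symm hvw]
          · apply List.map_congr_left
            intro u hu
            have huv : v < u := (List.pairwise_cons.mp hlt).1 u hu
            have h2 : w ≤ v := hw v hvts
            have hune : u ≠ w := by
              intro h
              exact absurd (lt_of_le_of_lt h2 huv) (by rw [h]; exact lt_irrefl w)
            simp [hune.symm]

-- two strictly increasing word lists with the same members are equal
lemma eq_of_pairwise_lt_mem :
    ∀ (l1 l2 : List (List Char)), l1.Pairwise (· < ·) → l2.Pairwise (· < ·) →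
      (∀ x, x ∈ l1 ↔ x ∈ l2) → l1 = l2 := by
  intro l1
  induction l1 with
  | nil =>
    intro l2 _ _ hm
    cases l2 with
    | nil => rfl
    | cons b t => exact absurd ((hm b).mpr List.mem_cons_self) (List.not_mem_nil)
  | cons a t1 ih =>
    intro l2 h1 h2 hm
    cases l2 with
    | nil => exact absurd ((hm a).mp List.mem_cons_self) (List.not_mem_nil)
    | cons b t2 =>
      have hab : a = b := by
        rcases List.mem_cons.mp ((hm a).mp List.mem_cons_self) with h | h
        · exact h
        rcases List.mem_cons.mp ((hm b).mpr List.mem_cons_self) with h' | h'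
        · exact h'.symm
        have hba := (List.pairwise_cons.mp h2).1 a h
        have hab' := (List.pairwise_cons.mp h1).1 b h'
        exact absurd (lt_trans hab' hba) (lt_irrefl _)
      subst hab
      congr 1
      apply ih t2 (List.pairwise_cons.mp h1).2 (List.pairwise_cons.mp h2).2
      intro x
      constructor
      · intro hx
        have hax : a < x := (List.pairwise_cons.mp h1).1 x hx
        rcases List.mem_cons.mp ((hm x).mp (List.mem_cons_of_mem _ hx)) with rfl | h
        · exact absurd hax (lt_irrefl _)
        · exact h
      · intro hx
        have hax : a < x := (List.pairwise_cons.mp h2).1 x hx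
        rcases List.mem_cons.mp ((hm x).mpr (List.mem_cons_of_mem _ hx)) with rfl | h
        · exact absurd hax (lt_irrefl _)
        · exact h

-- the pairwise min-scan over (w, f w) pairs is the min-scan over the words
lemma foldl_min_map (f : List Char → Int) :
    ∀ (ws : List (List Char)) (w : List Char),
      (ws.map (fun u => (u, f u))).foldl (fun (b : List Char × Int) x => if x.2 < b.2 then x else b) (w, f w)
        = (ws.foldl (fun b x => if f x < f b then x else b) w,
           f (ws.foldl (fun b x => if f x < f b then x else b) w)) := by
  intro ws
  induction ws with
  | nil => intro w; simp
  | cons x rs ih =>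
    intro w
    simp only [List.map_cons, List.foldl_cons]
    by_cases h : f x < f w
    · simp only [if_pos h]; exact ih x
    · simp only [if_neg h]; exact ih w

theorem rarestword_equal (string : String) : rarestword string = rarestword_alt string := by
  unfold rarestword rarestword_alt
  by_cases hg : (string.toList.isEmpty || PySem.Chars.strIsdigit string.toList) = true
  · rw [if_pos hg, if_pos hg]
  · rw [if_neg hg, if_neg hg]
    rw [PySem.List.foldl_append_if (p := fun i => PySem.Chars.isalpha i || PySem.Chars.isspace i)
        (f := PySem.Chars.lowerChar)]
    simp only [List.nil_append]
    set tokens : List (List Char) := PySem.Chars.split₀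
      ((string.toList.filter (fun c => PySem.Chars.isalpha c || PySem.Chars.isspace c)).map PySem.Chars.lowerChar)
      with htokens
    rcases htk : tokens with _ | ⟨t, ts0⟩
    · simp [PySem.Dict.counter]
    · -- A's guard: the counter of a nonempty token list is nonempty
      have hkeys : (PySem.Dict.counter (t :: ts0)).keys = PySem.Set.ofList (t :: ts0) :=
        PySem.Dict.keys_counter (t :: ts0)
      have hkne : (PySem.Dict.counter (t :: ts0)).keys ≠ [] := by
        rw [hkeys]
        intro hcon
        have : t ∈ PySem.Set.ofList (t :: ts0) := (PySem.Set.mem_ofList _ _).mpr List.mem_cons_self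
        rw [hcon] at this
        exact absurd this (List.not_mem_nil)
      have hsz : ¬ ((PySem.Dict.counter (t :: ts0)).size = 0) := by
        intro h
        apply hkne
        have : (PySem.Dict.counter (t :: ts0)).keys.length = 0 := by
          simpa [PySem.Dict.keys, PySem.Dict.size] using h
        exact List.length_eq_zero_iff.mp this
      rw [if_neg hsz, if_neg (show ¬(((t :: ts0) : List (List Char)).isEmpty = true) by simp)]
      have hnd := PySem.Dict.nodup_keys_counter (t :: ts0)
      rw [pick_eq (PySem.Dict.counter (t :: ts0)) hnd hkne]
      -- normalise both sorts to the canonical DecidableLT instance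
      simp only [sorted_inst]
      set d := PySem.Dict.counter (t :: ts0) with hd
      set f : List Char → Int := fun w => ((t :: ts0).count w : Int) with hfdef
      set sts := @PySem.List.sorted (List Char) (List Char) List.instLT
          (@LinearOrder.toDecidableLT _ List.instLinearOrder) (t :: ts0) (fun w => w) false with hsts
      set skeys := @PySem.List.sorted (List Char) (List Char) List.instLT
          (@LinearOrder.toDecidableLT _ List.instLinearOrder) d.keys (fun w => w) false with hskeys
      -- run-length-encode the sorted tokens
      have hpw : sts.Pairwise (· ≤ ·) := PySem.List.sorted_pairwise (t :: ts0) (fun w : List Char => w)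
      obtain ⟨ws, hwlt, hwmem, hweq⟩ := rle_sorted sts hpw
      -- counts in sts = counts in tokens
      have hperm : sts.Perm (t :: ts0) := @PySem.List.sorted_perm (List Char) (List Char) List.instLT
          (@LinearOrder.toDecidableLT _ List.instLinearOrder) (t :: ts0) (fun w => w) false
      have hpermk : skeys.Perm d.keys := @PySem.List.sorted_perm (List Char) (List Char) List.instLT
          (@LinearOrder.toDecidableLT _ List.instLinearOrder) d.keys (fun w => w) false
      have hcnt : ∀ u, sts.count u = (t :: ts0).count u := fun u => hperm.count_eq u
      -- the distinct-word list of the RLE is exactly the sorted keys of the counter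
      have hws : ws = skeys := by
        apply eq_of_pairwise_lt_mem ws skeys hwlt (sorted_nodup_lt d.keys hnd)
        intro x
        rw [hwmem x, hperm.mem_iff, hpermk.mem_iff, hkeys, PySem.Set.mem_ofList]
      have hweq' : sts.foldr pvRleStep [] = skeys.map (fun u => (u, f u)) := by
        rw [hweq, hws]
        apply List.map_congr_left
        intro u _
        rw [hfdef, hcnt u]
      rw [hweq']
      -- the counter's getD is the token count
      have hgd : ∀ u, d.getD u 0 = f u := by
        intro u
        rw [hd, hfdef, PySem.Dict.getD_counter]
      obtain ⟨w, rest, hsk⟩ : ∃ w rest, skeys = w :: rest := by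
        rcases hs : skeys with _ | ⟨w, rest⟩
        · exact absurd ((@PySem.List.sorted_eq_nil_iff (List Char) (List Char) List.instLT
              (@LinearOrder.toDecidableLT _ List.instLinearOrder) d.keys (fun w => w) false).mp
              (hskeys ▸ hs)) hkne
        · exact ⟨w, rest, rfl⟩
      rw [hsk, List.map_cons]
      simp only [hgd]
      rw [foldl_min_map f rest w]

-- ===== VERDICT (by name: the statement is the Claim_ definition above) =====
theorem rarestword_spec : Claim_equal_rarestword := by
  intro string _
  unfold Spec_rarestword
  exact rarestword_equal string
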